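-- pv_equiv track=rewrite | github.com/elrion018/CS_study | beakjoon_PS/no17144.py | wind_area1
-- ===== SOURCE A (Python) =====
-- def wind_area1(area1,c):
-- 		temp = [[0]*c for _ in range(len(area1))]
-- 		for y in range(len(area1)):
-- 			for x in range(c):
-- 				if y-1 < 0 and x-1 < 0: #왼쪽 상단 구석
-- 					temp[y+1][x] = area1[y][x]
-- 				elif y-1 <0 and x +1 == c: #오른쪽 상단 구석
-- 					temp[y][x-1] = area1[y][x]
-- 				elif y+1 == len(area1) and x -1 <0: # 왼쪽 하단 구석
-- 					temp[y][x+1] = area1[y][x]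
-- 				elif y+1 == len(area1) and x + 1 == c: # 오른쪽 하단 구석
-- 					temp[y-1][x] = area1[y][x]
-- 				elif y-1 <0:
-- 						temp[y][x-1] = area1[y][x]
-- 				elif y+1 == len(area1):
-- 						temp[y][x+1] = area1[y][x]
-- 				elif x-1 <0:
-- 						temp[y+1][x] = area1[y][x]
-- 				elif x+1 == c:
-- 						temp[y-1][x] = area1[y][x]
-- 				else:
-- 						temp[y][x] = area1[y][x]
--
-- 		area1 = overwrite_area(temp, area1, c)
-- 		return area1
--
-- def overwrite_area(temp, area,c):
-- 		for y in range(len(area)):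
-- 			for x in range(c):
-- 					if area[y][x] != -1:
-- 							if temp[y][x] == -1:
-- 								area[y][x] = 0
-- 							else:
-- 								area[y][x] = temp[y][x]
--
-- 		return area
-- ===== SOURCE B (Python) =====
-- # B: gather per destination via a closed-form source map (no scatter temp matrix).
-- # Note: A mutates area1 in place and returns it; B builds fresh rows (return-value equivalence).
-- def wind_area1(area1, c):
--     r = len(area1)
--     if r < 2 or c < 2:
--         return area1
--     def src(y, x):
--         if x == 0:
--             return (0, 1) if y == 0 else (y - 1, 0)
--         if y == r - 1:
--             return (r - 1, x - 1)
--         if x == c - 1: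
--             return (y + 1, c - 1)
--         if y == 0:
--             return (0, x + 1)
--         return (y, x)
--     out = []
--     for y in range(r):
--         row = area1[y]
--         new = list(row)
--         for x in range(c):
--             if row[x] != -1:
--                 sy, sx = src(y, x)
--                 v = area1[sy][sx]
--                 new[x] = 0 if v == -1 else v
--         out.append(new)
--     return out
-- ===== Notes on version B (the rewrite author's own statement) =====
-- stated objective: alternative
-- what changed: A scatters every cell of area1 into a freshly allocated temp matrix through a nine-branch write cascade and then runs a second overwrite pass mutating area1; B has no temp matrix at all: it computes, per destination cell, its unique ring-predecessor source via a closed-form map and builds each output row directly in one gather pass.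
import Mathlib
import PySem

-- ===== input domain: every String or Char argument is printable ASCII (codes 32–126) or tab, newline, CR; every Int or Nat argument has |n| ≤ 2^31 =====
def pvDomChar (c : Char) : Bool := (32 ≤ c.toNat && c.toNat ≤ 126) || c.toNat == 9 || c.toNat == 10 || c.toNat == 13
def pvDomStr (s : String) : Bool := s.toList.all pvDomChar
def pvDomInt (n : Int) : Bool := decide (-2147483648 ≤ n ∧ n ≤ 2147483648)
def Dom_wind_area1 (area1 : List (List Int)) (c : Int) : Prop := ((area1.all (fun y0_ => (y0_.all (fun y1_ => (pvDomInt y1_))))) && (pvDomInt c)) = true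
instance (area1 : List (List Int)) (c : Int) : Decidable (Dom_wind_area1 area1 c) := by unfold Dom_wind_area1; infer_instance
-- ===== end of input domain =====

-- B rotates the boundary ring by a per-destination closed-form source map (gather), where A
-- scatters every cell into a temp matrix and then runs a second overwrite pass.
-- A mutates area1 in place and returns it; the equivalence proved here is about the return value.

-- ===== PORT A =====
-- m[y][x] read and m[y][x] = v write; inside Pre_ every access is in range (exact there)
def getM (m : List (List Int)) (y x : Nat) : Int := (m.getD y []).getD x 0
def set2 (m : List (List Int)) (y x : Nat) (v : Int) : List (List Int) :=
  m.set y ((m.getD y []).set x v)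

-- helper overwrite_area of A; range(c) is empty for c ≤ 0 (exact)
def overwrite_area (temp area : List (List Int)) (c : Int) : List (List Int) :=
  (List.range area.length).foldl (fun a y =>
    (List.range c.toNat).foldl (fun a x =>
      if (a.getD y []).getD x 0 ≠ -1 then
        (if getM temp y x = -1 then set2 a y x 0 else set2 a y x (getM temp y x))
      else a) a) area

-- branch conditions: y-1<0 ↔ y=0, x-1<0 ↔ x=0, x+1==c ↔ x+1=c.toNat (x ∈ range(c)), y+1==len ↔ y+1=r;
-- Nat subtraction in the writes only occurs where the guards force x ≥ 1 / y ≥ 1 (exact)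
def wind_area1 (area1 : List (List Int)) (c : Int) : List (List Int) :=
  let r := area1.length
  let cN := c.toNat
  let temp0 : List (List Int) := (List.range r).map (fun _ => List.replicate cN 0)
  let temp := (List.range r).foldl (fun t y =>
    (List.range cN).foldl (fun t x =>
      let v := getM area1 y x
      if y = 0 ∧ x = 0 then set2 t (y+1) x v
      else if y = 0 ∧ x+1 = cN then set2 t y (x-1) v
      else if y+1 = r ∧ x = 0 then set2 t y (x+1) v
      else if y+1 = r ∧ x+1 = cN then set2 t (y-1) x v
      else if y = 0 then set2 t y (x-1) v
      else if y+1 = r then set2 t y (x+1) v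
      else if x = 0 then set2 t (y+1) x v
      else if x+1 = cN then set2 t (y-1) x v
      else set2 t y x v) t) temp0
  overwrite_area temp area1 c

-- ===== PORT B =====
-- closed-form ring-predecessor of destination (y,x) in an r × cN grid (B's src helper)
def srcB (r cN y x : Nat) : Nat × Nat :=
  if x = 0 then (if y = 0 then (0, 1) else (y - 1, 0))
  else if y = r - 1 then (r - 1, x - 1)
  else if x = cN - 1 then (y + 1, cN - 1)
  else if y = 0 then (0, x + 1)
  else (y, x)

def wind_area1_alt (area1 : List (List Int)) (c : Int) : List (List Int) :=
  let r := area1.length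
  if r < 2 ∨ c < 2 then area1
  else
    let cN := c.toNat
    (List.range r).foldl (fun out y =>
      let row := area1.getD y []
      let new := (List.range cN).foldl (fun nrow x =>
        if row.getD x 0 ≠ -1 then
          let s := srcB r cN y x
          let v := getM area1 s.1 s.2
          nrow.set x (if v = -1 then 0 else v)
        else nrow) row
      out ++ [new]) []

-- ===== PRECONDITION & SPEC =====
-- Pre_ excludes exactly the inputs where A raises IndexError: a grid with 1 row or 1 column
-- (the corner branches write outside temp) and rows shorter than c (area1[y][x] out of range).
def Pre_wind_area1 (area1 : List (List Int)) (c : Int) : Prop :=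
  c ≤ 0 ∨ area1 = [] ∨
    (2 ≤ area1.length ∧ 2 ≤ c ∧ ∀ row ∈ area1, c ≤ (row.length : Int))
instance (area1 : List (List Int)) (c : Int) : Decidable (Pre_wind_area1 area1 c) := by
  unfold Pre_wind_area1; infer_instance

def pvWitness_wind_area1 : List (List Int) × Int := ([[1, -1, 2], [3, 4, 5], [-1, 6, 7]], 3)

def Spec_wind_area1 (area1 : List (List Int)) (c : Int) (out : List (List Int)) : Prop := out = wind_area1_alt area1 c
instance (area1 : List (List Int)) (c : Int) (out : List (List Int)) : Decidable (Spec_wind_area1 area1 c out) := by unfold Spec_wind_area1; infer_instance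

-- ===== CLAIM (what is proved, stated in full; the proofs are below) =====
def Claim_equal_wind_area1 : Prop := ∀ (area1 : List (List Int)) (c : Int), Dom_wind_area1 area1 c → Pre_wind_area1 area1 c → Spec_wind_area1 area1 c (wind_area1 area1 c)

-- ===== LEMMAS AND PROOFS =====

theorem pvFoldlId {α β : Type} (l : List β) (a : α) : l.foldl (fun x _ => x) a = a := by
  induction l generalizing a with
  | nil => rfl
  | cons b l ih => simpa using ih a

-- getD over set, split by index
theorem pvGetD_set_self {α : Type} (l : List α) (i : Nat) (a d : α) (h : i < l.length) :
    (l.set i a).getD i d = a := by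
  rw [List.getD_eq_getElem?_getD, List.getElem?_set, if_pos rfl, if_pos h, Option.getD_some]

theorem pvGetD_set_ne {α : Type} (l : List α) (i j : Nat) (a d : α) (h : i ≠ j) :
    (l.set i a).getD j d = l.getD j d := by
  rw [List.getD_eq_getElem?_getD, List.getElem?_set, if_neg h, ← List.getD_eq_getElem?_getD]

theorem pvGetM_set2 (m : List (List Int)) (y x : Nat) (v : Int) (y' x' : Nat) :
    getM (set2 m y x v) y' x' =
      if y' = y ∧ x' = x ∧ y < m.length ∧ x < (m.getD y []).length then v
      else getM m y' x' := by
  unfold getM set2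
  by_cases hy : y < m.length
  · by_cases hyy : y' = y
    · rw [hyy, pvGetD_set_self _ _ _ _ hy]
      by_cases hxx : x' = x
      · rw [hxx]
        by_cases hx : x < (m.getD y []).length
        · rw [pvGetD_set_self _ _ _ _ hx, if_pos ⟨rfl, rfl, hy, hx⟩]
        · rw [List.set_eq_of_length_le (by omega), if_neg (fun hcon => hx hcon.2.2.2)]
      · rw [pvGetD_set_ne _ _ _ _ _ (fun h => hxx h.symm), if_neg (fun hcon => hxx hcon.2.1)]
    · rw [pvGetD_set_ne _ _ _ _ _ (fun h => hyy h.symm), if_neg (fun hcon => hyy hcon.1)]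
  · rw [List.set_eq_of_length_le (by omega), if_neg (fun hcon => hy hcon.2.2.1)]

def Shape (r cN : Nat) (m : List (List Int)) : Prop :=
  m.length = r ∧ ∀ row ∈ m, row.length = cN

theorem pvShape_set2 {r cN : Nat} {m : List (List Int)} (h : Shape r cN m)
    (y x : Nat) (v : Int) : Shape r cN (set2 m y x v) := by
  obtain ⟨h1, h2⟩ := h
  refine ⟨by simp [set2, h1], ?_⟩
  intro row hrow
  by_cases hy : y < m.length
  · rcases List.mem_or_eq_of_mem_set hrow with h' | h'
    · exact h2 _ h'
    · subst h'
      rw [List.length_set, List.getD_eq_getElem m [] hy]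
      exact h2 _ (List.getElem_mem hy)
  · unfold set2 at hrow
    rw [List.set_eq_of_length_le (by omega)] at hrow
    exact h2 _ hrow

-- A's temp construction, viewed as a scatter over the row-major grid
def destA (r cN : Nat) (y x : Nat) : Nat × Nat :=
  if y = 0 ∧ x = 0 then (y+1, x)
  else if y = 0 ∧ x+1 = cN then (y, x-1)
  else if y+1 = r ∧ x = 0 then (y, x+1)
  else if y+1 = r ∧ x+1 = cN then (y-1, x)
  else if y = 0 then (y, x-1)
  else if y+1 = r then (y, x+1)
  else if x = 0 then (y+1, x)
  else if x+1 = cN then (y-1, x)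
  else (y, x)

def stepT (area1 : List (List Int)) (r cN : Nat) (t : List (List Int)) (s : Nat × Nat) :
    List (List Int) :=
  set2 t (destA r cN s.1 s.2).1 (destA r cN s.1 s.2).2 (getM area1 s.1 s.2)

def gridL (r cN : Nat) : List (Nat × Nat) :=
  (List.range r).flatMap (fun y => (List.range cN).map (fun x => (y, x)))

theorem pvMem_gridL {r cN : Nat} {s : Nat × Nat} :
    s ∈ gridL r cN ↔ s.1 < r ∧ s.2 < cN := by
  obtain ⟨a, b⟩ := s
  simp only [gridL, List.mem_flatMap, List.mem_map, List.mem_range]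
  constructor
  · rintro ⟨y, hy, x, hx, hh⟩
    obtain ⟨rfl, rfl⟩ := Prod.mk.injEq .. ▸ hh
    exact ⟨hy, hx⟩
  · rintro ⟨ha, hb⟩
    exact ⟨a, ha, b, hb, rfl⟩

theorem pvScatter_skip (area1 : List (List Int)) (r cN y x : Nat) :
    ∀ (L : List (Nat × Nat)) (m : List (List Int)),
      (∀ s ∈ L, destA r cN s.1 s.2 ≠ (y, x)) →
      getM (L.foldl (stepT area1 r cN) m) y x = getM m y x := by
  intro L
  induction L with
  | nil => intro m _; rfl
  | cons s L ih =>
    intro m h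
    rw [List.foldl_cons, ih _ (fun s' hs' => h s' (List.mem_cons_of_mem _ hs'))]
    have hd : destA r cN s.1 s.2 ≠ (y, x) := h s (List.mem_cons_self ..)
    unfold stepT
    rw [pvGetM_set2]
    rw [if_neg (fun hcon => hd (by
      rw [Prod.ext_iff]; exact ⟨hcon.1.symm, hcon.2.1.symm⟩))]

theorem pvScatter_hit (area1 : List (List Int)) (r cN y x : Nat) (s0 : Nat × Nat)
    (hy : y < r) (hx : x < cN) (hd : destA r cN s0.1 s0.2 = (y, x)) :
    ∀ (L : List (Nat × Nat)) (m : List (List Int)), Shape r cN m →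
      s0 ∈ L → (∀ s ∈ L, destA r cN s.1 s.2 = (y, x) → s = s0) →
      getM (L.foldl (stepT area1 r cN) m) y x = getM area1 s0.1 s0.2 := by
  intro L
  induction L with
  | nil => intro m _ h; cases h
  | cons s L ih =>
    intro m hm hmem huni
    rw [List.foldl_cons]
    by_cases hsL : s0 ∈ L
    · exact ih _ (pvShape_set2 hm _ _ _) hsL
        (fun s' hs' h' => huni s' (List.mem_cons_of_mem _ hs') h')
    · have hs : s = s0 := by
        rcases List.mem_cons.mp hmem with h | h
        · exact h.symm
        · exact absurd h hsL
      subst hs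
      rw [pvScatter_skip area1 r cN y x L _
        (fun s' hs' h' => hsL (huni s' (List.mem_cons_of_mem _ hs') h' ▸ hs'))]
      have hml : m.length = r := hm.1
      have hlen : (m.getD y []).length = cN := by
        rw [List.getD_eq_getElem m [] (by omega)]
        exact hm.2 _ (List.getElem_mem (by omega))
      unfold stepT
      rw [hd]
      show getM (set2 m y x (getM area1 s.1 s.2)) y x = getM area1 s.1 s.2
      rw [pvGetM_set2, if_pos ⟨rfl, rfl, by omega, by omega⟩]

-- arithmetic facts on destA / srcB
set_option maxHeartbeats 2000000 in
theorem pvSrcB_lt {r cN y x : Nat} (hr : 2 ≤ r) (hc : 2 ≤ cN) (hy : y < r) (hx : x < cN) :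
    (srcB r cN y x).1 < r ∧ (srcB r cN y x).2 < cN := by
  unfold srcB
  split_ifs <;> dsimp only <;> omega

set_option maxHeartbeats 4000000 in
theorem pvDestA_srcB {r cN y x : Nat} (hr : 2 ≤ r) (hc : 2 ≤ cN) (hy : y < r) (hx : x < cN) :
    destA r cN (srcB r cN y x).1 (srcB r cN y x).2 = (y, x) := by
  unfold srcB
  split_ifs <;> dsimp only <;> unfold destA <;> split_ifs <;>
    rw [Prod.mk.injEq] <;>
    (first | omega | simp_all only [false_and, and_false])

set_option maxHeartbeats 4000000 in
theorem pvDestA_unique {r cN y x sy sx : Nat} (hr : 2 ≤ r) (hc : 2 ≤ cN)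
    (hsy : sy < r) (hsx : sx < cN) (h : destA r cN sy sx = (y, x)) :
    (sy, sx) = srcB r cN y x := by
  unfold destA at h
  unfold srcB
  split_ifs at h <;>
    (rw [Prod.mk.injEq] at h; obtain ⟨h1, h2⟩ := h; subst h1; subst h2) <;>
    split_ifs <;> rw [Prod.mk.injEq] <;>
    (first
      | omega
      | exact (by assumption : False).elim
      | ((simp only [false_and, and_false, true_and, and_true] at *) <;>
          (first | omega | exact (by assumption : False).elim)))

-- overwrite_area: its inner loop only touches row y
def rowStepO (temp : List (List Int)) (y : Nat) (ρ : List Int) (x : Nat) : List Int :=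
  if ρ.getD x 0 ≠ -1 then
    (if getM temp y x = -1 then ρ.set x 0 else ρ.set x (getM temp y x))
  else ρ

theorem pvOverwrite_inner (temp : List (List Int)) (y : Nat) :
    ∀ (xs : List Nat) (a : List (List Int)), y < a.length →
      xs.foldl (fun a x =>
        if (a.getD y []).getD x 0 ≠ -1 then
          (if getM temp y x = -1 then set2 a y x 0 else set2 a y x (getM temp y x))
        else a) a
      = a.set y (xs.foldl (rowStepO temp y) (a.getD y [])) := by
  intro xs
  induction xs with
  | nil =>
    intro a hy
    rw [List.foldl_nil, List.foldl_nil, List.getD_eq_getElem a [] hy, List.set_getElem_self]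
  | cons x xs ih =>
    intro a hy
    rw [List.foldl_cons, List.foldl_cons]
    by_cases ht : (a.getD y []).getD x 0 ≠ -1
    · by_cases hm : getM temp y x = -1
      · rw [if_pos ht, if_pos hm]
        rw [show rowStepO temp y (a.getD y []) x = (a.getD y []).set x 0 by
          unfold rowStepO; rw [if_pos ht, if_pos hm]]
        rw [ih _ (by simp [set2, hy])]
        unfold set2
        rw [pvGetD_set_self _ _ _ _ hy, List.set_set]
      · rw [if_pos ht, if_neg hm]
        rw [show rowStepO temp y (a.getD y []) x = (a.getD y []).set x (getM temp y x) by
          unfold rowStepO; rw [if_pos ht, if_neg hm]]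
        rw [ih _ (by simp [set2, hy])]
        unfold set2
        rw [pvGetD_set_self _ _ _ _ hy, List.set_set]
    · rw [if_neg ht]
      rw [show rowStepO temp y (a.getD y []) x = a.getD y [] by
        unfold rowStepO; rw [if_neg ht]]
      exact ih _ hy

theorem pvOuter_rows (S : List (List Int) → Nat → List (List Int))
    (G : Nat → List Int → List Int)
    (a : List (List Int))
    (hS : ∀ (b : List (List Int)) (y : Nat), b.length = a.length → y < b.length →
      S b y = b.set y (G y (b.getD y []))) :
    ∀ (k : Nat), k ≤ a.length →
      (List.range k).foldl S a = (List.range k).map (fun y => G y (a.getD y [])) ++ a.drop k := by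
  intro k
  induction k with
  | zero => intro _; simp
  | succ k ih =>
    intro hk
    rw [List.range_succ, List.foldl_append, List.foldl_cons, List.foldl_nil,
      ih (by omega), List.map_append]
    set M := (List.range k).map (fun y => G y (a.getD y [])) with hM
    have hMlen : M.length = k := by simp [hM]
    have hka : k < a.length := by omega
    have hprevlen : (M ++ a.drop k).length = a.length := by
      simp [hMlen]; omega
    rw [hS _ k hprevlen (by omega)]
    have hget : (M ++ a.drop k).getD k [] = a.getD k [] := by
      rw [List.getD_eq_getElem?_getD, List.getElem?_append_right (by omega), hMlen,
        Nat.sub_self, List.getElem?_drop, Nat.add_zero, List.getD_eq_getElem?_getD]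
    rw [hget]
    have hdrop : a.drop k = a[k] :: a.drop (k+1) := List.drop_eq_getElem_cons hka
    rw [hdrop]
    have h1 : (M ++ a[k] :: a.drop (k+1)).set k (G k (a.getD k []))
        = M ++ (a[k] :: a.drop (k+1)).set 0 (G k (a.getD k [])) := by
      rw [List.set_append]
      rw [if_neg (by omega), hMlen, Nat.sub_self]
    rw [h1, List.set_cons_zero]
    simp

-- value of a row after a conditional-set pass, A-shaped (the test reads the evolving row)
theorem pvRowA_len (f : Nat → Int) (ρ : List Int) (k : Nat) :
    ((List.range k).foldl (fun ρ' x => if ρ'.getD x 0 ≠ -1 then ρ'.set x (f x) else ρ') ρ).length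
      = ρ.length := by
  induction k with
  | zero => simp
  | succ k ih =>
    rw [List.range_succ, List.foldl_append, List.foldl_cons, List.foldl_nil]
    split_ifs
    · rw [List.length_set, ih]
    · exact ih

theorem pvRowA_get (f : Nat → Int) (ρ : List Int) :
    ∀ (k i : Nat), i < ρ.length →
      ((List.range k).foldl (fun ρ' x => if ρ'.getD x 0 ≠ -1 then ρ'.set x (f x) else ρ') ρ).getD i 0
        = if i < k ∧ ρ.getD i 0 ≠ -1 then f i else ρ.getD i 0 := by
  intro k
  induction k with
  | zero => intro i hi; simp
  | succ k ih =>
    intro i hi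
    rw [List.range_succ, List.foldl_append, List.foldl_cons, List.foldl_nil]
    set P := (List.range k).foldl (fun ρ' x => if ρ'.getD x 0 ≠ -1 then ρ'.set x (f x) else ρ') ρ with hP
    have hPlen : P.length = ρ.length := pvRowA_len f ρ k
    by_cases hik : i = k
    · subst hik
      have hPi : P.getD i 0 = ρ.getD i 0 := by
        rw [ih i hi]; simp
      by_cases htest : ρ.getD i 0 ≠ -1
      · rw [if_pos (by rw [hPi]; exact htest)]
        rw [pvGetD_set_self _ _ _ _ (by omega), if_pos ⟨by omega, htest⟩]
      · rw [if_neg (by rw [hPi]; exact htest), hPi, if_neg (fun hcon => htest hcon.2)]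
    · have hstep : (if P.getD k 0 ≠ -1 then P.set k (f k) else P).getD i 0 = P.getD i 0 := by
        split_ifs with h
        · exact pvGetD_set_ne _ _ _ _ _ (fun h' => hik h'.symm)
        · rfl
      rw [hstep, ih i hi]
      by_cases hlt : i < k
      · have : i < k + 1 := by omega
        simp [hlt, this]
      · have h2 : ¬ i < k + 1 := by omega
        simp [hlt, h2]

-- value of a row after a conditional-set pass, B-shaped (the test reads the original row)
theorem pvRowB_len (g : Nat → Int) (row : List Int) (k : Nat) :
    ((List.range k).foldl (fun nrow x => if row.getD x 0 ≠ -1 then nrow.set x (g x) else nrow) row).length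
      = row.length := by
  induction k with
  | zero => simp
  | succ k ih =>
    rw [List.range_succ, List.foldl_append, List.foldl_cons, List.foldl_nil]
    split_ifs
    · rw [List.length_set, ih]
    · exact ih

theorem pvRowB_get (g : Nat → Int) (row : List Int) :
    ∀ (k i : Nat), i < row.length →
      ((List.range k).foldl (fun nrow x => if row.getD x 0 ≠ -1 then nrow.set x (g x) else nrow) row).getD i 0
        = if i < k ∧ row.getD i 0 ≠ -1 then g i else row.getD i 0 := by
  intro k
  induction k with
  | zero => intro i hi; simp
  | succ k ih =>
    intro i hi
    rw [List.range_succ, List.foldl_append, List.foldl_cons, List.foldl_nil]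
    set P := (List.range k).foldl (fun nrow x => if row.getD x 0 ≠ -1 then nrow.set x (g x) else nrow) row with hP
    have hPlen : P.length = row.length := pvRowB_len g row k
    by_cases hik : i = k
    · subst hik
      by_cases htest : row.getD i 0 ≠ -1
      · rw [if_pos htest, pvGetD_set_self _ _ _ _ (by omega), if_pos ⟨by omega, htest⟩]
      · rw [if_neg htest, ih i hi, if_neg (fun hcon => htest hcon.2),
          if_neg (fun hcon => htest hcon.2)]
    · have hstep : (if row.getD k 0 ≠ -1 then P.set k (g k) else P).getD i 0 = P.getD i 0 := by
        split_ifs with h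
        · exact pvGetD_set_ne _ _ _ _ _ (fun h' => hik h'.symm)
        · rfl
      rw [hstep, ih i hi]
      by_cases hlt : i < k
      · have : i < k + 1 := by omega
        simp [hlt, this]
      · have h2 : ¬ i < k + 1 := by omega
        simp [hlt, h2]

-- ===== VERDICT (by name: the statement is the Claim_ definition above) =====
theorem wind_area1_spec : Claim_equal_wind_area1 := by
  intro area1 c _hdom hpre
  unfold Spec_wind_area1
  rcases hpre with hc | hnil | ⟨hr, hc2, hrows⟩
  · -- c ≤ 0: both loops are empty, both return area1
    have hcN0 : c.toNat = 0 := by omega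
    simp only [wind_area1, wind_area1_alt, overwrite_area, hcN0, List.range_zero,
      List.foldl_nil]
    rw [if_pos (Or.inr (by omega : c < 2)), pvFoldlId]
  · -- empty grid
    subst hnil
    simp [wind_area1, wind_area1_alt, overwrite_area]
  · -- main case: 2 ≤ r, 2 ≤ c
    have hcN : 2 ≤ c.toNat := by omega
    have hguard : ¬(area1.length < 2 ∨ c < 2) := by omega
    simp only [wind_area1, wind_area1_alt, overwrite_area]
    rw [if_neg hguard]
    set r := area1.length with hrdef
    set cN := c.toNat with hcNdef
    set temp0 := (List.range r).map (fun _ : Nat => List.replicate cN (0 : Int)) with ht0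
    have hshape0 : Shape r cN temp0 := by
      constructor
      · simp [ht0]
      · intro row hrow
        rcases List.mem_map.mp hrow with ⟨y, _, rfl⟩
        simp
    have htemp_eq :
        (List.range r).foldl (fun t y =>
          (List.range cN).foldl (fun t x =>
            if y = 0 ∧ x = 0 then set2 t (y+1) x (getM area1 y x)
            else if y = 0 ∧ x+1 = cN then set2 t y (x-1) (getM area1 y x)
            else if y+1 = r ∧ x = 0 then set2 t y (x+1) (getM area1 y x)
            else if y+1 = r ∧ x+1 = cN then set2 t (y-1) x (getM area1 y x)
            else if y = 0 then set2 t y (x-1) (getM area1 y x)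
            else if y+1 = r then set2 t y (x+1) (getM area1 y x)
            else if x = 0 then set2 t (y+1) x (getM area1 y x)
            else if x+1 = cN then set2 t (y-1) x (getM area1 y x)
            else set2 t y x (getM area1 y x)) t) temp0
        = (gridL r cN).foldl (stepT area1 r cN) temp0 := by
      unfold gridL
      rw [List.foldl_flatMap]
      congr 1
      funext t y
      rw [List.foldl_map]
      congr 1
      funext t' x
      simp only [stepT, destA]
      split_ifs <;> rfl
    rw [htemp_eq]
    set tempG := (gridL r cN).foldl (stepT area1 r cN) temp0 with htG
    have htempGet : ∀ y x, y < r → x < cN →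
        getM tempG y x = getM area1 (srcB r cN y x).1 (srcB r cN y x).2 := by
      intro y x hy hx
      apply pvScatter_hit area1 r cN y x (srcB r cN y x) hy hx
        (pvDestA_srcB hr hcN hy hx) _ _ hshape0
      · exact pvMem_gridL.mpr (pvSrcB_lt hr hcN hy hx)
      · intro s hs hds
        obtain ⟨a, b⟩ := s
        have hb := pvMem_gridL.mp hs
        exact pvDestA_unique hr hcN hb.1 hb.2 hds
    -- LHS: the overwrite pass, decomposed row by row
    rw [pvOuter_rows _ (fun y ρ => (List.range cN).foldl (rowStepO tempG y) ρ) area1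
      (fun b y _ hy => pvOverwrite_inner tempG y (List.range cN) b hy) r (by omega)]
    have hdropr : area1.drop r = [] := by rw [hrdef, List.drop_length]
    rw [hdropr, List.append_nil]
    -- RHS: B's accumulating loop is a map
    rw [PySem.List.foldl_append_singleton_eq_map]
    rw [List.nil_append]
    -- compare the two row functions on each y < r
    apply List.map_eq_map_iff.mpr
    intro y hy
    have hyr : y < r := List.mem_range.mp hy
    set ρ := area1.getD y [] with hρ
    -- massage A's row step into the generic conditional-set shape
    have hrowstep : rowStepO tempG y = fun ρ' x =>
        if ρ'.getD x 0 ≠ -1 then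
          ρ'.set x (if getM tempG y x = -1 then 0 else getM tempG y x) else ρ' := by
      funext ρ' x
      unfold rowStepO
      split_ifs <;> rfl
    rw [hrowstep]
    apply List.ext_getElem (by rw [pvRowA_len, pvRowB_len])
    intro i h1 h2
    rw [pvRowA_len] at h1
    rw [← List.getD_eq_getElem _ 0, ← List.getD_eq_getElem _ 0]
    rw [pvRowA_get _ _ _ _ h1, pvRowB_get _ _ _ _ h1]
    by_cases hcond : i < cN ∧ ρ.getD i 0 ≠ -1
    · rw [if_pos hcond, if_pos hcond, htempGet y i hyr hcond.1]
    · rw [if_neg hcond, if_neg hcond]
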